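-- pv_equiv track=rewrite | github.com/DEOWL-kan/ai-image-trust-scanner | scripts/day12_uncertain_decision_report.py | scenario_rows
-- ===== SOURCE A (Python) =====
-- from typing import Any, Iterable
--
-- def scenario_rows(rows: list[dict[str, Any]]) -> dict[str, list[dict[str, Any]]]:
--     return {
--         "real_jpeg_exif_unknown": [
--             row for row in rows
--             if row.get("true_label") == "real"
--             and (row.get("file_extension") in {".jpg", ".jpeg"} or str(row.get("format_group", "")).startswith("jpeg"))
--         ],
--         "ai_png": [
--             row for row in rows
--             if row.get("true_label") == "ai"
--             and (row.get("file_extension") == ".png" or row.get("format_group") == "png")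
--         ],
--         "converted_samples": [
--             row for row in rows
--             if row.get("input_source") == "day10_format_control" and row.get("format_group") not in {"", "original"}
--         ],
--         "resized_samples": [
--             row for row in rows
--             if row.get("input_source") == "day11_resolution_control" or row.get("resolution_group")
--         ],
--     }
-- ===== SOURCE B (Python) =====
-- def scenario_rows(rows):
--     real_jpeg, ai_png, conv, res = [], [], [], []
--     for row in rows:
--         tl = row.get("true_label")
--         src = row.get("input_source")
--         fg = row.get("format_group")
--         if tl == "real" and (row.get("file_extension") in (".jpg", ".jpeg")
--                              or str(row.get("format_group", "")).startswith("jpeg")):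
--             real_jpeg.append(row)
--         if tl == "ai" and (row.get("file_extension") == ".png" or fg == "png"):
--             ai_png.append(row)
--         if src == "day10_format_control" and fg not in ("", "original"):
--             conv.append(row)
--         if src == "day11_resolution_control" or row.get("resolution_group"):
--             res.append(row)
--     return {
--         "real_jpeg_exif_unknown": real_jpeg,
--         "ai_png": ai_png,
--         "converted_samples": conv,
--         "resized_samples": res,
--     }
-- ===== Notes on version B (the rewrite author's own statement) =====
-- stated objective: alternative
-- what changed: Replaces four separate full-list comprehensions (one per bucket) with a single pass over rows that tests the four predicates per row and appends to four accumulator lists.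
import Mathlib
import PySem

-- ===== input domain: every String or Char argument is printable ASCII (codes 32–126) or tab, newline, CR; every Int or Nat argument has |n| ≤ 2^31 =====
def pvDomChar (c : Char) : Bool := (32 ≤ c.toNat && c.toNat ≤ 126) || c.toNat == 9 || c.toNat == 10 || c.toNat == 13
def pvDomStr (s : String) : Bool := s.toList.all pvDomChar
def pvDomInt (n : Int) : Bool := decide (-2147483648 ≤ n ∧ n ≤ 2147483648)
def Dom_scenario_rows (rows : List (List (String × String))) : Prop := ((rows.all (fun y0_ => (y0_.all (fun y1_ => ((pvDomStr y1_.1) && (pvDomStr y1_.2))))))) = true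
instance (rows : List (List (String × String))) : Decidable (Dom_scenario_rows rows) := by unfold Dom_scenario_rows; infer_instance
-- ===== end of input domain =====

-- B replaces A's four full-list comprehensions with one pass that appends each row
-- to every matching bucket (alternative decomposition; same predicates, same order).

-- row.get(k): Python dict lookup on the row (shared dict-access semantics of the input encoding)
def pvGet (row : List (String × String)) (k : String) : Option String :=
  (PySem.Dict.ofList row).get? k
def pvGetD (row : List (String × String)) (k : String) (d : String) : String :=
  (PySem.Dict.ofList row).getD k d

-- ===== PORT A =====
-- the four comprehension predicates, one per bucket
def pA1 (row : List (String × String)) : Bool :=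
  pvGet row "true_label" == some "real" &&
    (pvGet row "file_extension" == some ".jpg" || pvGet row "file_extension" == some ".jpeg" ||
     PySem.Str.startswith (pvGetD row "format_group" "") "jpeg")
def pA2 (row : List (String × String)) : Bool :=
  pvGet row "true_label" == some "ai" &&
    (pvGet row "file_extension" == some ".png" || pvGet row "format_group" == some "png")
def pA3 (row : List (String × String)) : Bool :=
  pvGet row "input_source" == some "day10_format_control" &&
    !(pvGet row "format_group" == some "" || pvGet row "format_group" == some "original")
def pA4 (row : List (String × String)) : Bool :=
  pvGet row "input_source" == some "day11_resolution_control" ||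
    !((pvGet row "resolution_group").getD "" == "")   -- Python truthiness of Optional[str]

def scenario_rows (rows : List (List (String × String))) : List (String × List (List (String × String))) :=
  [("real_jpeg_exif_unknown", rows.filter pA1),
   ("ai_png", rows.filter pA2),
   ("converted_samples", rows.filter pA3),
   ("resized_samples", rows.filter pA4)]

-- ===== PORT B =====
-- one loop step: test the four predicates on the row and append it to each matching bucket
def pvStepB (acc : List (List (String × String)) × List (List (String × String)) ×
                   List (List (String × String)) × List (List (String × String)))
    (row : List (String × String)) :
    List (List (String × String)) × List (List (String × String)) ×
    List (List (String × String)) × List (List (String × String)) :=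
  let tl := pvGet row "true_label"
  let src := pvGet row "input_source"
  let fg := pvGet row "format_group"
  (if tl == some "real" &&
      (pvGet row "file_extension" == some ".jpg" || pvGet row "file_extension" == some ".jpeg" ||
       PySem.Str.startswith (pvGetD row "format_group" "") "jpeg")
   then acc.1 ++ [row] else acc.1,
   if tl == some "ai" && (pvGet row "file_extension" == some ".png" || fg == some "png")
   then acc.2.1 ++ [row] else acc.2.1,
   if src == some "day10_format_control" && !(fg == some "" || fg == some "original")
   then acc.2.2.1 ++ [row] else acc.2.2.1,
   if src == some "day11_resolution_control" || !((pvGet row "resolution_group").getD "" == "")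
   then acc.2.2.2 ++ [row] else acc.2.2.2)

def scenario_rows_alt (rows : List (List (String × String))) : List (String × List (List (String × String))) :=
  let r := rows.foldl pvStepB ([], [], [], [])
  [("real_jpeg_exif_unknown", r.1),
   ("ai_png", r.2.1),
   ("converted_samples", r.2.2.1),
   ("resized_samples", r.2.2.2)]

-- ===== PRECONDITION & SPEC =====
def Spec_scenario_rows (rows : List (List (String × String))) (out : List (String × List (List (String × String)))) : Prop := out = scenario_rows_alt rows
instance (rows : List (List (String × String))) (out : List (String × List (List (String × String)))) : Decidable (Spec_scenario_rows rows out) := by unfold Spec_scenario_rows; infer_instance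

-- ===== CLAIM (what is proved, stated in full; the proofs are below) =====
def Claim_equal_scenario_rows : Prop := ∀ (rows : List (List (String × String))), Dom_scenario_rows rows → Spec_scenario_rows rows (scenario_rows rows)

-- ===== LEMMAS AND PROOFS =====

lemma pvStepB_eq (acc : List (List (String × String)) × List (List (String × String)) ×
    List (List (String × String)) × List (List (String × String))) (r : List (String × String)) :
    pvStepB acc r =
      (if pA1 r then acc.1 ++ [r] else acc.1,
       if pA2 r then acc.2.1 ++ [r] else acc.2.1,
       if pA3 r then acc.2.2.1 ++ [r] else acc.2.2.1,
       if pA4 r then acc.2.2.2 ++ [r] else acc.2.2.2) := rfl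

lemma foldl_pvStepB (rows : List (List (String × String))) :
    ∀ (a b c d : List (List (String × String))),
      rows.foldl pvStepB (a, b, c, d) =
        (a ++ rows.filter pA1, b ++ rows.filter pA2, c ++ rows.filter pA3, d ++ rows.filter pA4) := by
  induction rows with
  | nil => intro a b c d; simp
  | cons r rest ih =>
    intro a b c d
    rw [List.foldl_cons, pvStepB_eq]
    simp only [List.filter_cons]
    by_cases h1 : pA1 r <;> by_cases h2 : pA2 r <;> by_cases h3 : pA3 r <;> by_cases h4 : pA4 r <;>
      simp [h1, h2, h3, h4, ih, List.append_assoc]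

-- ===== VERDICT (by name: the statement is the Claim_ definition above) =====
theorem scenario_rows_spec : Claim_equal_scenario_rows := by
  intro rows _
  show scenario_rows rows = scenario_rows_alt rows
  simp [scenario_rows, scenario_rows_alt, foldl_pvStepB]
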